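-- pv_equiv track=rewrite | github.com/Okm165/agh | cw2/zad4.py | search
-- ===== SOURCE A (Python) =====
-- import math
--
-- def prim_factorize(a):
--     F = []
--     e = 2
--     while a>1 and e <= math.sqrt(a):
--         if(a%e == 0):
--             F.append(e)
--             a = a//e
--             continue
--         e += 1
--     if(a != 1): F.append(a)
--     return F
--
-- def search(N):
--     result = 1
--     for i in range(2, N+1):
--         factors = prim_factorize(i)
--         flag = (2 in factors) and (3 in factors) and (5 in factors)
--         factors = [a for a in factors if (a != 2) and (a != 3) and (a != 5)]
--         if(not factors and flag):
--             result += 1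
--     return result
-- ===== SOURCE B (Python) =====
-- def search(N):
--     # Count i in [2, N] whose prime factorization uses exactly the primes 2, 3, 5
--     # (each at least once), by stripping those factors instead of full trial division.
--     count = 0
--     for i in range(2, N + 1):
--         if i % 30:
--             continue
--         m = i
--         for p in (2, 3, 5):
--             while m % p == 0:
--                 m //= p
--         if m == 1:
--             count += 1
--     return count + 1
-- ===== Notes on version B (the rewrite author's own statement) =====
-- stated objective: faster
-- what changed: Instead of fully trial-division-factorizing every i up to sqrt(i) and inspecting the factor list, B skips i not divisible by 30 and strips the factors 2, 3, 5 from i, counting i when the remainder is 1.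
import Mathlib
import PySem

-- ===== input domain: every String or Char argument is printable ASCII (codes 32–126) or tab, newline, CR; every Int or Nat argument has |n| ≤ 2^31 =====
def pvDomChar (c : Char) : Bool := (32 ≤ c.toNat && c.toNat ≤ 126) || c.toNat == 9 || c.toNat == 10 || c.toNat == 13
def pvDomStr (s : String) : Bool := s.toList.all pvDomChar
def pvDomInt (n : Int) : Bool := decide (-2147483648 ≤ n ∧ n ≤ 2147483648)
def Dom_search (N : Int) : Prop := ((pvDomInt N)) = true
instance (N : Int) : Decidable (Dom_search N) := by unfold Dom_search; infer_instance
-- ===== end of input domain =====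

-- B replaces A's per-i trial-division factorization by stripping the factors 2,3,5
-- from multiples of 30; same return value, measurably faster.

-- ===== PORT A =====
-- while-loop of prim_factorize; state (a, e, F).  'e <= math.sqrt(a)' is ported as
-- 'e * e ≤ a', exact for the integers reached here (|a| ≤ 2^31, doubles are exact).
-- fuel only bounds the number of iterations so the recursion is structural; with the
-- fuel prim_factorize supplies the loop always exits through its own condition.
def pfLoop (fuel : Nat) (a e : Int) (F : List Int) : List Int × Int :=
  match fuel with
  | 0 => (F, a)
  | fuel + 1 =>
    if 1 < a ∧ e * e ≤ a then
      if PySem.Int.mod a e = 0 then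
        pfLoop fuel (PySem.Int.floordiv a e) e (F ++ [e])
      else
        pfLoop fuel a (e + 1) F
    else (F, a)

def prim_factorize (a : Int) : List Int :=
  let r := pfLoop (3 * a.toNat + 1) a 2 []
  if r.2 ≠ 1 then r.1 ++ [r.2] else r.1

def search (N : Int) : Int :=
  (PySem.List.pyRange 2 (N + 1) 1).foldl
    (fun result i =>
      let factors := prim_factorize i
      let flag := factors.contains 2 && factors.contains 3 && factors.contains 5
      let factors2 := factors.filter (fun a => decide (a ≠ 2) && decide (a ≠ 3) && decide (a ≠ 5))
      if factors2.isEmpty && flag then result + 1 else result)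
    1

-- ===== PORT B =====
-- 'while m % p == 0: m //= p'; fuel i.toNat + 1 bounds the iterations (the loop
-- always exits through its own test before the fuel runs out on B's inputs).
def stripLoop (fuel : Nat) (p m : Int) : Int :=
  match fuel with
  | 0 => m
  | fuel + 1 =>
    if PySem.Int.mod m p = 0 then stripLoop fuel p (PySem.Int.floordiv m p) else m

def search_alt (N : Int) : Int :=
  ((PySem.List.pyRange 2 (N + 1) 1).foldl
    (fun count i =>
      if PySem.Int.mod i 30 ≠ 0 then count
      else if stripLoop (i.toNat + 1) 5 (stripLoop (i.toNat + 1) 3 (stripLoop (i.toNat + 1) 2 i)) = 1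
        then count + 1 else count)
    0) + 1

-- ===== PRECONDITION & SPEC =====
def Spec_search (N : Int) (out : Int) : Prop := out = search_alt N
instance (N : Int) (out : Int) : Decidable (Spec_search N out) := by unfold Spec_search; infer_instance

-- ===== CLAIM (what is proved, stated in full; the proofs are below) =====
def Claim_equal_search : Prop := ∀ (N : Int), Dom_search N → Spec_search N (search N)

-- ===== LEMMAS AND PROOFS =====

-- the common mathematical characterization of both per-i conditions
def Qp (i : Int) : Prop :=
  2 ∣ i ∧ 3 ∣ i ∧ 5 ∣ i ∧ ∀ q : Int, 2 ≤ q → Prime q → q ∣ i → q = 2 ∨ q = 3 ∨ q = 5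

-- a divisor ≥ 2 of a prime ≥ 2 is the prime itself
lemma dvd_prime_eq (p q : Int) (hq : Prime q) (hp2 : 2 ≤ p) (hq2 : 2 ≤ q) (h : p ∣ q) : p = q := by
  obtain ⟨c, hc⟩ := h
  rcases hq.irreducible.isUnit_or_isUnit hc with hu | hu
  · exact absurd (Int.isUnit_iff.mp hu) (by omega)
  · rcases Int.isUnit_iff.mp hu with rfl | rfl
    · omega
    · omega

-- minimality of a divisor gives primality
lemma prime_of_minimal (e : Int) (he : 2 ≤ e)
    (hmin : ∀ k : Int, 2 ≤ k → k < e → ¬ k ∣ e) : Prime e := by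
  rw [Int.prime_iff_natAbs_prime]
  have hnn : (e.natAbs : Int) = e := Int.natAbs_of_nonneg (by omega)
  rw [Nat.prime_def_lt]
  refine ⟨by omega, fun m hm hdvd => ?_⟩
  by_contra hm1
  have hm0 : m ≠ 0 := by rintro rfl; simp at hdvd; omega
  have : (m : Int) ∣ e := by rw [← hnn]; exact_mod_cast hdvd
  exact hmin m (by omega) (by rw [← hnn]; exact_mod_cast hm) this

-- no divisor below e together with e² > a makes a prime
lemma prime_of_sqrt (a e : Int) (ha : 1 < a) (he : 2 ≤ e) (hs : a < e * e)
    (hmin : ∀ k : Int, 2 ≤ k → k < e → ¬ k ∣ a) : Prime a := by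
  rw [Int.prime_iff_natAbs_prime]
  have hnn : (a.natAbs : Int) = a := Int.natAbs_of_nonneg (by omega)
  rw [Nat.prime_def_lt]
  refine ⟨by omega, fun m hm hdvd => ?_⟩
  by_contra hm1
  have hm0 : m ≠ 0 := by rintro rfl; simp at hdvd; omega
  have hmdvd : (m : Int) ∣ a := by rw [← hnn]; exact_mod_cast hdvd
  by_cases hme : (m : Int) < e
  · exact hmin m (by omega) hme hmdvd
  · obtain ⟨c, hc⟩ := hmdvd
    have hm2 : (2 : Int) ≤ (m : Int) := by exact_mod_cast (by omega : 2 ≤ m)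
    have hma : (m : Int) < a := by rw [← hnn]; exact_mod_cast hm
    have hc0 : 0 < c := by nlinarith
    have hc2 : 2 ≤ c := by
      rcases (by omega : c = 1 ∨ 2 ≤ c) with rfl | h2
      · omega
      · exact h2
    have hce : c < e := by nlinarith
    exact hmin c hc2 hce ⟨m, by linarith [hc]⟩

-- the trial-division loop appends exactly the prime divisors of a (the final cofactor included)
lemma pfLoop_fact : ∀ (fuel : Nat) (a e : Int) (F : List Int), 2 ≤ e → 1 ≤ a →
    (∀ k : Int, 2 ≤ k → k < e → ¬ k ∣ a) →
    2 * a.toNat + (a + 1 - e).toNat < fuel →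
    ∃ S a', pfLoop fuel a e F = (F ++ S, a') ∧
      (∀ x ∈ S ++ (if a' = 1 then ([] : List Int) else [a']), 2 ≤ x ∧ Prime x ∧ x ∣ a) ∧
      (∀ q : Int, 2 ≤ q → Prime q → q ∣ a →
        q ∈ S ++ (if a' = 1 then ([] : List Int) else [a'])) := by
  intro fuel
  induction fuel with
  | zero => intro a e F he ha hmin hfuel; omega
  | succ fuel ih =>
    intro a e F he ha hmin hfuel
    by_cases h : 1 < a ∧ e * e ≤ a
    · by_cases hm : PySem.Int.mod a e = 0
      · -- dividing step: a = (a // e) * e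
        have hme := PySem.Int.floordiv_mul_add_mod a e
        rw [hm, add_zero] at hme
        have hq1 : 1 ≤ PySem.Int.floordiv a e := by nlinarith [h.1]
        have hq2 : 2 * PySem.Int.floordiv a e ≤ a := by nlinarith
        have hedvd : e ∣ a := ⟨PySem.Int.floordiv a e, by linarith⟩
        have hqdvd : PySem.Int.floordiv a e ∣ a := ⟨e, by linarith⟩
        have hePrime : Prime e :=
          prime_of_minimal e he (fun k hk2 hke hkd => hmin k hk2 hke (hkd.trans hedvd))
        have hmin' : ∀ k : Int, 2 ≤ k → k < e → ¬ k ∣ PySem.Int.floordiv a e :=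
          fun k hk2 hke hkd => hmin k hk2 hke (hkd.trans hqdvd)
        obtain ⟨S, a', heq, hsound, hcomp⟩ :=
          ih (PySem.Int.floordiv a e) e (F ++ [e]) he hq1 hmin' (by omega)
        refine ⟨e :: S, a', ?_, ?_, ?_⟩
        · simp only [pfLoop]
          rw [if_pos h, if_pos hm, heq]
          simp
        · intro x hx
          simp only [List.cons_append, List.mem_cons] at hx
          rcases hx with rfl | hx'
          · exact ⟨he, hePrime, hedvd⟩
          · obtain ⟨h2, hp, hd⟩ := hsound x hx'
            exact ⟨h2, hp, hd.trans hqdvd⟩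
        · intro q hq2' hqP hqd
          have : q ∣ PySem.Int.floordiv a e * e := by rw [hme]; exact hqd
          rcases (Prime.dvd_mul hqP).mp this with hq | hq
          · have hmem := hcomp q hq2' hqP hq
            simp only [List.cons_append, List.mem_cons]
            exact Or.inr hmem
          · have : q = e := dvd_prime_eq q e hePrime hq2' he hq
            simp [this]
      · -- e does not divide a
        have hea : e ≤ a := by nlinarith [h.2]
        have hmin' : ∀ k : Int, 2 ≤ k → k < e + 1 → ¬ k ∣ a := by
          intro k hk2 hke hkd
          rcases (by omega : k < e ∨ k = e) with hlt | rfl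
          · exact hmin k hk2 hlt hkd
          · exact hm ((PySem.Int.mod_eq_zero_iff_dvd a k).mpr hkd)
        obtain ⟨S, a', heq, hsound, hcomp⟩ := ih a (e + 1) F (by omega) ha hmin' (by omega)
        refine ⟨S, a', ?_, hsound, hcomp⟩
        simp only [pfLoop]
        rw [if_pos h, if_neg hm]
        exact heq
    · -- loop exit
      refine ⟨[], a, by simp only [pfLoop]; rw [if_neg h]; simp, ?_, ?_⟩
      · intro x hx
        by_cases ha1 : a = 1
        · simp [ha1] at hx
        · rw [if_neg ha1] at hx
          simp only [List.nil_append, List.mem_singleton] at hx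
          subst hx
          have hs : x < e * e := by
            rcases not_and_or.mp h with h1 | h2
            · omega
            · omega
          exact ⟨by omega, prime_of_sqrt x e (by omega) he hs hmin, dvd_refl x⟩
      · intro q hq2 hqP hqd
        by_cases ha1 : a = 1
        · subst ha1
          have := Int.le_of_dvd (by norm_num) hqd
          omega
        · have hs : a < e * e := by
            rcases not_and_or.mp h with h1 | h2
            · omega
            · omega
          have haPrime : Prime a := prime_of_sqrt a e (by omega) he hs hmin
          have : q = a := dvd_prime_eq q a haPrime hq2 (by omega) hqd
          simp [ha1, this]

lemma prim_factorize_fact (a : Int) (ha : 1 ≤ a) :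
    (∀ x ∈ prim_factorize a, 2 ≤ x ∧ Prime x ∧ x ∣ a) ∧
    (∀ q : Int, 2 ≤ q → Prime q → q ∣ a → q ∈ prim_factorize a) := by
  obtain ⟨S, a', heq, hsound, hcomp⟩ :=
    pfLoop_fact (3 * a.toNat + 1) a 2 [] (by norm_num) ha (by intro k h1 h2 _; omega) (by omega)
  have hpf : prim_factorize a = S ++ (if a' = 1 then ([] : List Int) else [a']) := by
    simp only [prim_factorize, heq]
    by_cases h1 : a' = 1 <;> simp [h1]
  rw [hpf]
  exact ⟨hsound, hcomp⟩

-- the stripping loop: m = p^k * (stripLoop fuel p m) with p no longer dividing the result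
lemma stripLoop_spec : ∀ (fuel : Nat) (p m : Int), 2 ≤ p → m.toNat < fuel → 0 < m →
    ∃ k : ℕ, m = p ^ k * stripLoop fuel p m ∧ ¬ p ∣ stripLoop fuel p m ∧
      0 < stripLoop fuel p m := by
  intro fuel
  induction fuel with
  | zero => intro p m hp hmn h0; omega
  | succ fuel ih =>
    intro p m hp hmn h0
    by_cases hm : PySem.Int.mod m p = 0
    · have hrw : stripLoop (fuel + 1) p m = stripLoop fuel p (PySem.Int.floordiv m p) := by
        simp only [stripLoop]; rw [if_pos hm]
      have hme := PySem.Int.floordiv_mul_add_mod m p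
      rw [hm, add_zero] at hme
      have hq1 : 1 ≤ PySem.Int.floordiv m p := by nlinarith
      have hq2 : 2 * PySem.Int.floordiv m p ≤ m := by nlinarith
      obtain ⟨k, hk1, hk2, hk3⟩ := ih p (PySem.Int.floordiv m p) hp (by omega) (by omega)
      refine ⟨k + 1, ?_, by rw [hrw]; exact hk2, by rw [hrw]; exact hk3⟩
      calc m = PySem.Int.floordiv m p * p := hme.symm
        _ = (p ^ k * stripLoop fuel p (PySem.Int.floordiv m p)) * p := by rw [← hk1]
        _ = p ^ (k + 1) * stripLoop fuel p (PySem.Int.floordiv m p) := by ring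
        _ = p ^ (k + 1) * stripLoop (fuel + 1) p m := by rw [← hrw]
    · have hrw : stripLoop (fuel + 1) p m = m := by
        simp only [stripLoop]; rw [if_neg hm]
      refine ⟨0, by rw [hrw]; ring, ?_, by rw [hrw]; exact h0⟩
      rw [hrw]
      intro hdvd
      exact hm ((PySem.Int.mod_eq_zero_iff_dvd m p).mpr hdvd)

-- B's per-i test characterized
lemma condB_iff (i : Int) (hi : 2 ≤ i) :
    (PySem.Int.mod i 30 = 0 ∧
      stripLoop (i.toNat + 1) 5 (stripLoop (i.toNat + 1) 3 (stripLoop (i.toNat + 1) 2 i)) = 1)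
    ↔ Qp i := by
  obtain ⟨a, h1a, h1nd, h1pos⟩ :=
    stripLoop_spec (i.toNat + 1) 2 i (by norm_num) (by omega) (by omega)
  set m1 := stripLoop (i.toNat + 1) 2 i with hm1def
  have hm1i : m1 ∣ i := Dvd.intro_left _ h1a.symm
  have hm1le : m1.toNat < i.toNat + 1 := by
    have := Int.le_of_dvd (by omega) hm1i
    omega
  obtain ⟨b, h2a, h2nd, h2pos⟩ := stripLoop_spec (i.toNat + 1) 3 m1 (by norm_num) hm1le h1pos
  set m2 := stripLoop (i.toNat + 1) 3 m1 with hm2def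
  have hm2m1 : m2 ∣ m1 := Dvd.intro_left _ h2a.symm
  have hm2le : m2.toNat < i.toNat + 1 := by
    have h1 := Int.le_of_dvd h1pos hm2m1
    have h2 := Int.le_of_dvd (by omega) hm1i
    omega
  obtain ⟨c, h3a, h3nd, h3pos⟩ := stripLoop_spec (i.toNat + 1) 5 m2 (by norm_num) hm2le h2pos
  set m3 := stripLoop (i.toNat + 1) 5 m2 with hm3def
  have hm3m2 : m3 ∣ m2 := Dvd.intro_left _ h3a.symm
  constructor
  · rintro ⟨h30, hone⟩
    have h30' : (30 : Int) ∣ i := (PySem.Int.mod_eq_zero_iff_dvd i 30).mp h30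
    refine ⟨(by norm_num : (2:Int) ∣ 30).trans h30', (by norm_num : (3:Int) ∣ 30).trans h30',
      (by norm_num : (5:Int) ∣ 30).trans h30', fun q hq2 hqP hqi => ?_⟩
    by_contra hqn
    push_neg at hqn
    have hq1 : q ∣ m1 := by
      rcases (Prime.dvd_mul hqP).mp (h1a ▸ hqi) with h | h
      · exact absurd (dvd_prime_eq q 2 Int.prime_two hq2 (by norm_num) (hqP.dvd_of_dvd_pow h))
          (by omega)
      · exact h
    have hq2' : q ∣ m2 := by
      rcases (Prime.dvd_mul hqP).mp (h2a ▸ hq1) with h | h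
      · exact absurd (dvd_prime_eq q 3 Int.prime_three hq2 (by norm_num) (hqP.dvd_of_dvd_pow h))
          (by omega)
      · exact h
    have hq3 : q ∣ m3 := by
      rcases (Prime.dvd_mul hqP).mp (h3a ▸ hq2') with h | h
      · exact absurd (dvd_prime_eq q 5 (by rw [Int.prime_iff_natAbs_prime]; norm_num) hq2
          (by norm_num) (hqP.dvd_of_dvd_pow h)) (by omega)
      · exact h
    rw [hone] at hq3
    have := Int.le_of_dvd (by norm_num) hq3
    omega
  · rintro ⟨hd2, hd3, hd5, hq⟩
    refine ⟨(PySem.Int.mod_eq_zero_iff_dvd i 30).mpr (by omega), ?_⟩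
    by_contra hne
    have h2m3 : ¬ (2 : Int) ∣ m3 := fun h => h1nd (h.trans (hm3m2.trans hm2m1))
    have h3m3 : ¬ (3 : Int) ∣ m3 := fun h => h2nd (h.trans hm3m2)
    have hm3_2 : 2 ≤ m3 := by omega
    have hPp : m3.toNat.minFac.Prime := Nat.minFac_prime (by omega : m3.toNat ≠ 1)
    have hPd : (m3.toNat.minFac : Int) ∣ m3 := by
      have h1 := Nat.minFac_dvd m3.toNat
      have h2 : ((m3.toNat : Nat) : Int) = m3 := by omega
      exact h2 ▸ Int.natCast_dvd_natCast.mpr h1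
    have hPi : (m3.toNat.minFac : Int) ∣ i := hPd.trans (hm3m2.trans (hm2m1.trans hm1i))
    have hP2 : (2 : Int) ≤ (m3.toNat.minFac : Int) := by exact_mod_cast hPp.two_le
    rcases hq _ hP2 (by rw [Int.prime_iff_natAbs_prime, Int.natAbs_natCast]; exact hPp) hPi
      with h | h | h
    · exact h2m3 (h ▸ hPd)
    · exact h3m3 (h ▸ hPd)
    · exact h3nd (h ▸ hPd)

-- A's per-i test (the exact Bool computed in the fold)
def pA (i : Int) : Bool :=
  let factors := prim_factorize i
  let flag := factors.contains 2 && factors.contains 3 && factors.contains 5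
  let factors2 := factors.filter (fun a => decide (a ≠ 2) && decide (a ≠ 3) && decide (a ≠ 5))
  factors2.isEmpty && flag

lemma condA_iff (i : Int) (hi : 2 ≤ i) : pA i = true ↔ Qp i := by
  obtain ⟨hsound, hcomp⟩ := prim_factorize_fact i (by omega)
  simp only [pA, Bool.and_eq_true, List.isEmpty_iff, List.filter_eq_nil_iff,
    List.contains_iff_mem, Bool.and_eq_true, decide_eq_true_eq, not_and]
  constructor
  · rintro ⟨hempty, ⟨h2m, h3m⟩, h5m⟩
    refine ⟨(hsound 2 h2m).2.2, (hsound 3 h3m).2.2, (hsound 5 h5m).2.2, fun q hq2 hqP hqd => ?_⟩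
    have hmem := hcomp q hq2 hqP hqd
    have hx5 := hempty q hmem
    by_contra hcon
    push_neg at hcon
    exact (hx5 ⟨hcon.1, hcon.2.1⟩) hcon.2.2
  · rintro ⟨hd2, hd3, hd5, hq⟩
    refine ⟨fun x hx => ?_, ⟨?_, ?_⟩, ?_⟩
    · obtain ⟨hx2, hxP, hxd⟩ := hsound x hx
      intro hne23 hne5
      rcases hq x hx2 hxP hxd with h | h | h
      · exact hne23.1 h
      · exact hne23.2 h
      · exact hne5 h
    · exact hcomp 2 (by norm_num) Int.prime_two hd2
    · exact hcomp 3 (by norm_num) Int.prime_three hd3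
    · exact hcomp 5 (by norm_num) (by rw [Int.prime_iff_natAbs_prime]; norm_num) hd5

-- ===== VERDICT (by name: the statement is the Claim_ definition above) =====
theorem search_spec : Claim_equal_search := by
  intro N _
  unfold Spec_search
  have hA : search N = (PySem.List.pyRange 2 (N + 1) 1).foldl
      (fun r i => if pA i then r + 1 else r) 1 := rfl
  have hB : search_alt N = (PySem.List.pyRange 2 (N + 1) 1).foldl
      (fun c i =>
        if PySem.Int.mod i 30 ≠ 0 then c
        else if stripLoop (i.toNat + 1) 5 (stripLoop (i.toNat + 1) 3 (stripLoop (i.toNat + 1) 2 i)) = 1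
          then c + 1 else c) 0 + 1 := rfl
  have hcg : ∀ (acc : Int), ∀ i ∈ PySem.List.pyRange 2 (N + 1) 1,
      (if PySem.Int.mod i 30 ≠ 0 then acc
       else if stripLoop (i.toNat + 1) 5 (stripLoop (i.toNat + 1) 3 (stripLoop (i.toNat + 1) 2 i)) = 1
         then acc + 1 else acc) =
      (if PySem.Int.mod i 30 = 0 ∧
          stripLoop (i.toNat + 1) 5 (stripLoop (i.toNat + 1) 3 (stripLoop (i.toNat + 1) 2 i)) = 1
       then acc + 1 else acc) := by
    intro acc i _
    by_cases h1 : PySem.Int.mod i 30 = 0 <;>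
      by_cases h2 : stripLoop (i.toNat + 1) 5 (stripLoop (i.toNat + 1) 3 (stripLoop (i.toNat + 1) 2 i)) = 1 <;>
      simp [h1, h2]
  have hcount : (PySem.List.pyRange 2 (N + 1) 1).countP pA =
      (PySem.List.pyRange 2 (N + 1) 1).countP
        (fun i => decide (PySem.Int.mod i 30 = 0 ∧
          stripLoop (i.toNat + 1) 5 (stripLoop (i.toNat + 1) 3 (stripLoop (i.toNat + 1) 2 i)) = 1)) := by
    apply List.countP_congr
    intro x hx
    have hx2 : 2 ≤ x := ((PySem.List.mem_pyRange_one).mp hx).1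
    have h1 := condA_iff x hx2
    have h2 := condB_iff x hx2
    simp only [decide_eq_true_eq]
    exact h1.trans h2.symm
  rw [hA, PySem.List.foldl_if_add_one, hB, PySem.List.foldl_congr_mem _ _ _ _ hcg,
    PySem.List.foldl_ite_add_one, hcount]
  ring
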